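-- pv_equiv track=rewrite | github.com/GunnarGunnarsson/oprivatepool | src/rideshare/geography/path/path_util.py | reduce_path
-- ===== SOURCE A (Python) =====
-- def reduce_path(path, max_points=100):
--     """
--     Keeps the first and last point in the path, and chooses `max_points-2` evenly spaced points in between
--
--     References
--         http://stackoverflow.com/questions/9873626/choose-m-evenly-spaced-elements-from-a-sequence-of-length-n
--         https://en.wikipedia.org/wiki/Bresenham%27s_line_algorithm
--
--     :param path:
--     :param max_points:
--     :return:
--     """
--     assert max_points >= 2
--
--     if len(path) <= max_points:
--         return path
--
--     first = path[0]
--     del path[0]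
--     last = path[-1]
--     del path[-1]
--
--     max_points -= 2
--
--     l = len(path)
--
--     indexes = [i * l // max_points + l // (2 * max_points) for i in range(max_points)]
--
--     result = [first]
--
--     for i in indexes:
--         result.append(path[i])
--     result.append(last)
--     return result
-- ===== SOURCE B (Python) =====
-- def reduce_path(path, max_points=100):
--     """One-pass re-implementation: walks the interior points once with a
--     Bresenham-style error accumulator instead of building an index list and
--     doing random access. Performs the same in-place deletions as the original."""
--     assert max_points >= 2
--
--     if len(path) <= max_points:
--         return path
--
--     first = path.pop(0)
--     last = path.pop()
--
--     m = max_points - 2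
--     l = len(path)
--
--     result = [first]
--     if m > 0:
--         off = l // (2 * m)
--         acc = 0
--         taken = 0
--         for j, p in enumerate(path):
--             if taken < m and j == acc // m + off:
--                 result.append(p)
--                 acc += l
--                 taken += 1
--     result.append(last)
--     return result
-- ===== Notes on version B (the rewrite author's own statement) =====
-- stated objective: alternative
-- what changed: Replaces A's precomputed closed-form index list plus random access into the interior points by a single left-to-right pass over the interior points with a Bresenham-style error accumulator that selects each point as it is reached.
import Mathlib
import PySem

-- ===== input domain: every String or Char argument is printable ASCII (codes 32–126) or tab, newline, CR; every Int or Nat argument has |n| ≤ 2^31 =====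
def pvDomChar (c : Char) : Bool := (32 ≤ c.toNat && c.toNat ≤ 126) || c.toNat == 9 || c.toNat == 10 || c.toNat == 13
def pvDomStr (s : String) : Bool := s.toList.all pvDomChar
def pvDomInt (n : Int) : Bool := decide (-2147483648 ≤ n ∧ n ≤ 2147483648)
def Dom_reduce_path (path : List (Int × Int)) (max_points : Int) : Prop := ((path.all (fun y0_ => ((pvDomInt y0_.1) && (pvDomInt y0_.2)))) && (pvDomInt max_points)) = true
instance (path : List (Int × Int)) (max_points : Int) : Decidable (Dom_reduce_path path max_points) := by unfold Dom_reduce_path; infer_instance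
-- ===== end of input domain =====

-- B replaces A's index-list-plus-random-access construction by a single left-to-right
-- pass over the interior points with a Bresenham-style error accumulator (objective:
-- alternative). Both A and B delete the first and last element of `path` in place;
-- the equivalence proved here is about the return value (the mutation is identical).

-- ===== PORT A =====
-- `del path[0]` / `del path[-1]` are ported as drop 1 / dropLast (removal at the ends);
-- path[0] / path[-1] via pyGetD (in range under Pre_: the else branch has len(path) ≥ 3).
def reduce_path (path : List (Int × Int)) (max_points : Int) : List (Int × Int) :=
  if (path.length : Int) ≤ max_points then path
  else
    let first := PySem.List.pyGetD path 0 (0, 0)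
    let path1 := path.drop 1
    let last := PySem.List.pyGetD path1 (-1) (0, 0)
    let path2 := path1.dropLast
    let m := max_points - 2
    let l : Int := path2.length
    let indexes := (PySem.List.pyRange 0 m 1).map
      (fun i => PySem.Int.floordiv (i * l) m + PySem.Int.floordiv l (2 * m))
    let result := indexes.foldl
      (fun res i => res ++ [PySem.List.pyGetD path2 i (0, 0)]) [first]
    result ++ [last]

-- ===== PORT B =====
def reduce_path_alt (path : List (Int × Int)) (max_points : Int) : List (Int × Int) :=
  if (path.length : Int) ≤ max_points then path
  else
    let first := PySem.List.pyGetD path 0 (0, 0)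
    let path1 := path.drop 1
    let last := PySem.List.pyGetD path1 (-1) (0, 0)
    let path2 := path1.dropLast
    let m := max_points - 2
    let l : Int := path2.length
    let result : List (Int × Int) := [first]
    let result :=
      if 0 < m then
        let off := PySem.Int.floordiv l (2 * m)
        ((PySem.List.enumerate path2 0).foldl
          (fun (s : Int × Int × List (Int × Int)) jp =>
            if s.2.1 < m ∧ jp.1 = PySem.Int.floordiv s.1 m + off
            then (s.1 + l, s.2.1 + 1, s.2.2 ++ [jp.2])
            else s) (0, 0, result)).2.2
      else result
    result ++ [last]

-- ===== PRECONDITION & SPEC =====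
-- Pre_: the assert in A requires max_points >= 2 (AssertionError otherwise).
def Pre_reduce_path (path : List (Int × Int)) (max_points : Int) : Prop :=
  2 ≤ max_points
instance (path : List (Int × Int)) (max_points : Int) : Decidable (Pre_reduce_path path max_points) := by unfold Pre_reduce_path; infer_instance
def pvWitness_reduce_path : (List (Int × Int)) × Int := ([(0, 0), (1, 1), (2, 2), (3, 3)], 3)

def Spec_reduce_path (path : List (Int × Int)) (max_points : Int) (out : List (Int × Int)) : Prop := out = reduce_path_alt path max_points
instance (path : List (Int × Int)) (max_points : Int) (out : List (Int × Int)) : Decidable (Spec_reduce_path path max_points out) := by unfold Spec_reduce_path; infer_instance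

-- ===== CLAIM (what is proved, stated in full; the proofs are below) =====
def Claim_equal_reduce_path : Prop := ∀ (path : List (Int × Int)) (max_points : Int), Dom_reduce_path path max_points → Pre_reduce_path path max_points → Spec_reduce_path path max_points (reduce_path path max_points)

-- ===== LEMMAS AND PROOFS =====

-- floor division is monotone in the numerator (positive divisor)
lemma fdiv_mono_num (a c b : Int) (hb : 0 < b) (h : a ≤ c) :
    PySem.Int.floordiv a b ≤ PySem.Int.floordiv c b := by
  rw [PySem.Int.le_floordiv_iff_mul_le hb]
  have h1 : PySem.Int.floordiv a b * b ≤ a := (PySem.Int.le_floordiv_iff_mul_le hb).mp le_rfl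
  omega

-- the target indexes are strictly increasing
lemma g_strict_mono (l m off t : Int) (hm : 0 < m) (hml : m ≤ l) :
    PySem.Int.floordiv (t * l) m + off + 1 ≤ PySem.Int.floordiv ((t + 1) * l) m + off := by
  have h1 : PySem.Int.floordiv (t * l) m * m ≤ t * l :=
    (PySem.Int.le_floordiv_iff_mul_le hm).mp le_rfl
  have h2 : PySem.Int.floordiv (t * l) m + 1 ≤ PySem.Int.floordiv ((t + 1) * l) m := by
    rw [PySem.Int.le_floordiv_iff_mul_le hm]
    nlinarith
  omega

-- every target index is below l
lemma g_lt_l (l m off i : Int) (hm : 0 < m) (hml : m < l)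
    (hoff : off = PySem.Int.floordiv l (2 * m)) (him : i < m) :
    PySem.Int.floordiv (i * l) m + off < l := by
  have h2m : (0:Int) < 2 * m := by omega
  have hl0 : (0:Int) < l := by omega
  have h1 : PySem.Int.floordiv (i * l) m ≤ PySem.Int.floordiv ((m - 1) * l) m :=
    fdiv_mono_num _ _ _ hm (by nlinarith)
  have h2 : PySem.Int.floordiv ((m - 1) * l) m * m ≤ (m - 1) * l :=
    (PySem.Int.le_floordiv_iff_mul_le hm).mp le_rfl
  have h3 : PySem.Int.floordiv l (2 * m) * (2 * m) ≤ l :=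
    (PySem.Int.le_floordiv_iff_mul_le h2m).mp le_rfl
  have h4 : PySem.Int.floordiv ((m - 1) * l) m + PySem.Int.floordiv l (2 * m) < l := by
    nlinarith
  omega

lemma off_nonneg (l m : Int) (hm : 0 < m) (hl : 0 ≤ l) :
    0 ≤ PySem.Int.floordiv l (2 * m) := by
  rw [PySem.Int.le_floordiv_iff_mul_le (by omega : (0:Int) < 2 * m)]
  omega

-- The one-pass error-accumulator scan of B collects exactly the elements at A's
-- closed-form indexes.  State: (acc, taken, res) with acc = taken * l.
lemma scan_collect (path2 : List (Int × Int)) (m l off : Int)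
    (hm : 0 < m) (hml : m < l) (hl : l = (path2.length : Int))
    (hoff : off = PySem.Int.floordiv l (2 * m)) :
    ∀ (k : Nat) (j0 t : Int) (res : List (Int × Int)),
      (l - j0).toNat = k → 0 ≤ j0 → 0 ≤ t → t ≤ m →
      (t < m → j0 ≤ PySem.Int.floordiv (t * l) m + off) →
      (((PySem.List.pyRange j0 l 1).map
          (fun j => (j, PySem.List.pyGetD path2 j (0, 0)))).foldl
        (fun (s : Int × Int × List (Int × Int)) jp =>
          if s.2.1 < m ∧ jp.1 = PySem.Int.floordiv s.1 m + off
          then (s.1 + l, s.2.1 + 1, s.2.2 ++ [jp.2])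
          else s) (t * l, t, res)).2.2
      = res ++ (PySem.List.pyRange t m 1).map
          (fun i => PySem.List.pyGetD path2 (PySem.Int.floordiv (i * l) m + off) (0, 0)) := by
  intro k
  induction k with
  | zero =>
    intro j0 t res hk hj0 ht0 htm hnext
    have hjl : l ≤ j0 := by omega
    rw [PySem.List.pyRange_one_eq_nil hjl]
    have htm' : t = m := by
      by_contra h
      have htlt : t < m := by omega
      have h1 := hnext htlt
      have h2 := g_lt_l l m off t hm hml hoff htlt
      omega
    subst htm'
    rw [PySem.List.pyRange_one_eq_nil le_rfl]
    simp
  | succ k ih =>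
    intro j0 t res hk hj0 ht0 htm hnext
    have hjl : j0 < l := by omega
    rw [PySem.List.pyRange_one_cons hjl]
    simp only [List.map_cons, List.foldl_cons]
    by_cases hc : t < m ∧ j0 = PySem.Int.floordiv (t * l) m + off
    · obtain ⟨htlt, hj⟩ := hc
      rw [if_pos (by exact ⟨htlt, hj⟩)]
      have hstep : (t * l + l, t + 1, res ++ [PySem.List.pyGetD path2 j0 (0, 0)])
          = ((t + 1) * l, t + 1, res ++ [PySem.List.pyGetD path2 j0 (0, 0)]) := by
        ring_nf
      rw [hstep]
      rw [ih (j0 + 1) (t + 1) _ (by omega) (by omega) (by omega) (by omega)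
          (fun h1 => by
            have := g_strict_mono l m off t hm (by omega)
            omega)]
      rw [PySem.List.pyRange_one_cons htlt]
      simp [hj]
    · rw [if_neg hc]
      exact ih (j0 + 1) t res (by omega) (by omega) ht0 htm
        (fun h1 => by
          have h2 := hnext h1
          have h3 : j0 ≠ PySem.Int.floordiv (t * l) m + off := fun h => hc ⟨h1, h⟩
          omega)

-- ===== VERDICT (by name: the statement is the Claim_ definition above) =====
theorem reduce_path_spec : Claim_equal_reduce_path := by
  intro path max_points _hdom hpre
  unfold Spec_reduce_path reduce_path reduce_path_alt
  by_cases hb : (path.length : Int) ≤ max_points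
  · simp [hb]
  · simp only [if_neg hb]
    set path2 := (path.drop 1).dropLast with hpath2
    set m := max_points - 2 with hm_def
    set l : Int := (path2.length : Int) with hl_def
    set off := PySem.Int.floordiv l (2 * m) with hoff_def
    have hlen : 3 ≤ path.length := by
      have : (2:Int) ≤ max_points := hpre
      omega
    have hlen2 : path2.length = path.length - 2 := by
      simp only [hpath2, List.length_dropLast, List.length_drop]
      omega
    have hml : m < l := by
      simp only [hl_def, hlen2, hm_def]
      push_cast [Nat.cast_sub (by omega : 2 ≤ path.length)]
      omega
    by_cases hm : 0 < m
    · -- A side: foldl-append is a map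
      rw [PySem.List.foldl_append_singleton_eq_map]
      -- B side: enumerate as a map over pyRange, then the scan lemma
      rw [if_pos hm]
      rw [PySem.List.enumerate_eq_map_pyRange path2 ((0:Int), (0:Int))]
      rw [show PySem.List.len path2 = l from rfl]
      have hstart : ∀ h1 : (0:Int) < m,
          (0:Int) ≤ PySem.Int.floordiv (0 * l) m + off := by
        intro h1
        have h2 : PySem.Int.floordiv (0 * l) m = 0 := by
          norm_num [PySem.Int.floordiv_eq_ediv_of_pos h1]
        have h3 : 0 ≤ off := off_nonneg l m hm (by omega)
        omega
      have := scan_collect path2 m l off hm hml rfl rfl ((l - 0).toNat) 0 0 [PySem.List.pyGetD path 0 (0, 0)]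
        rfl le_rfl le_rfl (by omega) hstart
      simp only [zero_mul] at this
      rw [this]
      simp [List.map_map, Function.comp_def]
    · -- m = 0: no interior point is chosen by either implementation
      rw [if_neg hm]
      have hm0 : m ≤ 0 := by omega
      rw [PySem.List.pyRange_one_eq_nil hm0]
      simp
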